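-- pv_equiv track=rewrite | github.com/patrikbrach/infoMailer | kontaktberikare/enricher.py | _pick_best_email
-- ===== SOURCE A (Python) =====
-- EMAIL_PRIORITY = ["info@", "kontakt@", "bokning@", "hej@", "mail@"]
--
-- def _pick_best_email(emails: list[str]) -> str | None:
--     if not emails:
--         return None
--     for prefix in EMAIL_PRIORITY:
--         for e in emails:
--             if e.startswith(prefix):
--                 return e
--     return emails[0]
-- ===== SOURCE B (Python) =====
-- EMAIL_PRIORITY = ["info@", "kontakt@", "bokning@", "hej@", "mail@"]
--
-- def _pick_best_email(emails: list[str]) -> str | None: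
--     if not emails:
--         return None
--     n = len(EMAIL_PRIORITY)
--     best, best_rank = None, n
--     for e in emails:
--         r = next((i for i, p in enumerate(EMAIL_PRIORITY) if e.startswith(p)), n)
--         if r < best_rank:
--             best, best_rank = e, r
--     return best if best is not None else emails[0]
-- ===== Notes on version B (the rewrite author's own statement) =====
-- stated objective: alternative
-- what changed: Replaced the prefix-outer/email-inner nested scan by a single pass over the emails that ranks each email by the first priority prefix it matches and keeps the earliest email of minimal rank.
import Mathlib
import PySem

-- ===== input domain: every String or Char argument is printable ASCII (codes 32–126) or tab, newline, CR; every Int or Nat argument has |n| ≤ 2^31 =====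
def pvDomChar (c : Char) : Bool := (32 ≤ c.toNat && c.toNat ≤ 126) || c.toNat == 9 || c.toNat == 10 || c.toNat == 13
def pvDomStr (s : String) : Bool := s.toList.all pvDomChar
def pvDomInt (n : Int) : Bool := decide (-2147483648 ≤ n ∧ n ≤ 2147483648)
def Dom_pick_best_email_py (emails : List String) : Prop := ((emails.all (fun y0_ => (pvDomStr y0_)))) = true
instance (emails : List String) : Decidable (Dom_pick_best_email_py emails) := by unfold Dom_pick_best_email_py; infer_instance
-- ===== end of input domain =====

-- B replaces A's prefix-outer/email-inner nested scan by a single pass over the emails,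
-- ranking each email by the first priority prefix it matches and keeping the earliest
-- email of minimal rank (objective: alternative single-pass algorithm, same cost).

-- ===== PORT A =====
def EMAIL_PRIORITY : List String := ["info@", "kontakt@", "bokning@", "hej@", "mail@"]

-- A's outer loop over prefixes; the inner 'for e in emails: if e.startswith(prefix): return e'
-- is the first-match scan List.find?.
def pickLoopA (emails : List String) : List String → Option String
  | [] => none
  | p :: ps =>
    match emails.find? (fun e => PySem.Str.startswith e p) with
    | some e => some e
    | none => pickLoopA emails ps

def pick_best_email_py (emails : List String) : Option String :=
  if emails = [] then none
  else
    match pickLoopA emails EMAIL_PRIORITY with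
    | some e => some e
    | none => PySem.List.pyGet? emails 0

-- ===== PORT B =====
-- next((i for i, p in enumerate(EMAIL_PRIORITY) if e.startswith(p)), n)
def rankOf (e : String) : Int :=
  (((PySem.List.enumerate EMAIL_PRIORITY).find? (fun ip => PySem.Str.startswith e ip.2)).map
    Prod.fst).getD (EMAIL_PRIORITY.length : Int)

def stepB (st : Option String × Int) (e : String) : Option String × Int :=
  let r := rankOf e
  if r < st.2 then (some e, r) else st

def pick_best_email_py_alt (emails : List String) : Option String :=
  if emails = [] then none
  else
    let st := emails.foldl stepB (none, (EMAIL_PRIORITY.length : Int))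
    match st.1 with
    | some b => some b
    | none => PySem.List.pyGet? emails 0

-- ===== PRECONDITION & SPEC =====
def Spec_pick_best_email_py (emails : List String) (out : Option String) : Prop := out = pick_best_email_py_alt emails
instance (emails : List String) (out : Option String) : Decidable (Spec_pick_best_email_py emails out) := by unfold Spec_pick_best_email_py; infer_instance

-- ===== CLAIM (what is proved, stated in full; the proofs are below) =====
def Claim_equal_pick_best_email_py : Prop := ∀ (emails : List String), Dom_pick_best_email_py emails → Spec_pick_best_email_py emails (pick_best_email_py emails)

-- ===== LEMMAS AND PROOFS =====

-- rankOf as an explicit if-chain over the five prefixes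
theorem rankOf_eq (e : String) : rankOf e =
    if PySem.Str.startswith e "info@" then 0
    else if PySem.Str.startswith e "kontakt@" then 1
    else if PySem.Str.startswith e "bokning@" then 2
    else if PySem.Str.startswith e "hej@" then 3
    else if PySem.Str.startswith e "mail@" then 4
    else 5 := by
  cases h1 : PySem.Str.startswith e "info@" <;>
  cases h2 : PySem.Str.startswith e "kontakt@" <;>
  cases h3 : PySem.Str.startswith e "bokning@" <;>
  cases h4 : PySem.Str.startswith e "hej@" <;>
  cases h5 : PySem.Str.startswith e "mail@" <;>
  · simp only [rankOf, EMAIL_PRIORITY, PySem.List.enumerate, List.find?]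
    rw [h1, h2, h3, h4, h5]
    decide

theorem rankOf_nonneg (e : String) : 0 ≤ rankOf e := by
  rw [rankOf_eq]; split_ifs <;> norm_num

-- running minimum of ranks
def minR (c : Int) (l : List String) : Int := l.foldl (fun a e => min a (rankOf e)) c

theorem minR_le (l : List String) : ∀ c : Int, minR c l ≤ c := by
  induction l with
  | nil => intro c; simp [minR]
  | cons e l ih =>
    intro c
    have h := ih (min c (rankOf e))
    simp only [minR, List.foldl_cons] at h ⊢
    exact le_trans h (min_le_left _ _)

theorem minR_le_mem (l : List String) : ∀ c : Int, ∀ e ∈ l, minR c l ≤ rankOf e := by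
  induction l with
  | nil => intro c e h; cases h
  | cons x l ih =>
    intro c e he
    simp only [minR, List.foldl_cons]
    rcases List.mem_cons.1 he with rfl | he
    · exact le_trans (minR_le l _) (min_le_right _ _)
    · exact ih (min c (rankOf x)) e he

theorem minR_attained (l : List String) : ∀ c : Int, minR c l = c ∨ ∃ e ∈ l, rankOf e = minR c l := by
  induction l with
  | nil => intro c; left; rfl
  | cons x l ih =>
    intro c
    have hm : minR c (x :: l) = minR (min c (rankOf x)) l := rfl
    rw [hm]
    rcases ih (min c (rankOf x)) with h | ⟨e, he, hr⟩
    · rw [h]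
      rcases min_cases c (rankOf x) with ⟨h1, _⟩ | ⟨h1, _⟩
      · left; exact h1
      · right; exact ⟨x, List.mem_cons_self .., h1.symm⟩
    · right; exact ⟨e, List.mem_cons_of_mem _ he, hr⟩

-- characterization of B's fold
theorem fold_char (l : List String) : ∀ (o : Option String) (c : Int),
    l.foldl stepB (o, c) =
      (if minR c l = c then (o, c)
       else (l.find? (fun e => rankOf e == minR c l), minR c l)) := by
  induction l with
  | nil => intro o c; simp [minR]
  | cons x l ih =>
    intro o c
    have hm : minR c (x :: l) = minR (min c (rankOf x)) l := by
      simp [minR]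
    rw [List.foldl_cons, hm]
    by_cases hx : rankOf x < c
    · have hmin : min c (rankOf x) = rankOf x := by omega
      rw [hmin] at *
      have hstep : stepB (o, c) x = (some x, rankOf x) := by
        simp [stepB, hx]
      rw [hstep, ih]
      by_cases h1 : minR (rankOf x) l = rankOf x
      · rw [h1]
        have : ¬ (rankOf x = c) := by omega
        simp [this]
      · have hle := minR_le l (rankOf x)
        have hne : ¬ (minR (rankOf x) l = c) := by omega
        have hnex : ¬ (rankOf x == minR (rankOf x) l) = true := by
          simp; omega
        simp [h1, hne, hnex]
    · have hmin : min c (rankOf x) = c := by omega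
      rw [hmin]
      have hstep : stepB (o, c) x = (o, c) := by
        simp [stepB]; omega
      rw [hstep, ih]
      by_cases h1 : minR c l = c
      · simp [h1]
      · have hle := minR_le l c
        have hnex : ¬ (rankOf x == minR c l) = true := by
          simp; omega
        simp [h1, hnex]

-- find? respects pointwise-equal predicates on members
theorem find?_congr_mem {α : Type} {p q : α → Bool} :
    ∀ (l : List α), (∀ e ∈ l, p e = q e) → l.find? p = l.find? q := by
  intro l
  induction l with
  | nil => intro _; rfl
  | cons x l ih =>
    intro h
    have hx := h x (List.mem_cons_self ..)
    simp only [List.find?_cons, hx]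
    cases q x
    · exact ih (fun e he => h e (List.mem_cons_of_mem _ he))
    · rfl

-- startswith prefix j bounds the rank
theorem rank_le_of_sw (e : String) :
    (PySem.Str.startswith e "info@" = true → rankOf e ≤ 0) ∧
    (PySem.Str.startswith e "kontakt@" = true → rankOf e ≤ 1) ∧
    (PySem.Str.startswith e "bokning@" = true → rankOf e ≤ 2) ∧
    (PySem.Str.startswith e "hej@" = true → rankOf e ≤ 3) ∧
    (PySem.Str.startswith e "mail@" = true → rankOf e ≤ 4) := by
  rw [rankOf_eq]; split_ifs <;> simp_all

-- the rank determines which prefix matched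
theorem sw_of_rank (e : String) :
    (rankOf e = 0 → PySem.Str.startswith e "info@" = true) ∧
    (rankOf e = 1 → PySem.Str.startswith e "kontakt@" = true) ∧
    (rankOf e = 2 → PySem.Str.startswith e "bokning@" = true) ∧
    (rankOf e = 3 → PySem.Str.startswith e "hej@" = true) ∧
    (rankOf e = 4 → PySem.Str.startswith e "mail@" = true) := by
  rw [rankOf_eq]; split_ifs <;> simp_all

-- A's prefix loop returns the first email of minimal rank k when one exists
theorem pickLoopA_char (emails : List String) (k : Int)
    (h0 : 0 ≤ k) (h5 : k < 5)
    (hmem : ∀ e ∈ emails, k ≤ rankOf e)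
    (hex : ∃ e ∈ emails, rankOf e = k) :
    pickLoopA emails EMAIL_PRIORITY = emails.find? (fun e => rankOf e == k) := by
  obtain ⟨b, hb, hbr⟩ := hex
  -- each of the five prefixes, in order
  have none_of_lt : ∀ (p : String), (∀ e : String, PySem.Str.startswith e p = true → rankOf e < k) →
      emails.find? (fun e => PySem.Str.startswith e p) = none := by
    intro p hp
    apply List.find?_eq_none.2
    intro e he hsw
    exact absurd (hmem e he) (by have := hp e hsw; omega)
  have eq_of_k : ∀ (p : String),
      (∀ e : String, PySem.Str.startswith e p = true → rankOf e ≤ k) →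
      (∀ e : String, rankOf e = k → PySem.Str.startswith e p = true) →
      emails.find? (fun e => PySem.Str.startswith e p) = emails.find? (fun e => rankOf e == k) := by
    intro p h1 h2
    apply find?_congr_mem
    intro e he
    have hge := hmem e he
    show PySem.Str.startswith e p = (rankOf e == k)
    by_cases hr : rankOf e = k
    · rw [h2 e hr]
      exact (beq_iff_eq.mpr hr).symm
    · have hsw : PySem.Str.startswith e p = false := by
        cases hc : PySem.Str.startswith e p
        · rfl
        · exact absurd (by have := h1 e hc; omega : rankOf e = k) hr
      rw [hsw]
      exact (beq_eq_false_iff_ne.mpr hr).symm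
  have hsomek : emails.find? (fun e => rankOf e == k) ≠ none := by
    intro hn
    exact absurd hbr (by simpa using List.find?_eq_none.1 hn b hb)
  have step : ∀ (p : String),
      (∀ e : String, PySem.Str.startswith e p = true → rankOf e ≤ k) →
      (∀ e : String, rankOf e = k → PySem.Str.startswith e p = true) →
      ∀ ps, pickLoopA emails (p :: ps) = emails.find? (fun e => rankOf e == k) := by
    intro p h1 h2 ps
    rw [pickLoopA, eq_of_k p h1 h2]
    cases hfq : emails.find? (fun e => rankOf e == k) with
    | none => exact absurd hfq hsomek
    | some b' => rfl
  have hk : k = 0 ∨ k = 1 ∨ k = 2 ∨ k = 3 ∨ k = 4 := by omega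
  rcases hk with rfl | rfl | rfl | rfl | rfl
  · exact step "info@" (fun e h => (rank_le_of_sw e).1 h) (fun e h => (sw_of_rank e).1 h) _
  · rw [show EMAIL_PRIORITY = "info@" :: ["kontakt@", "bokning@", "hej@", "mail@"] from rfl,
      pickLoopA, none_of_lt "info@" (fun e h => by have := (rank_le_of_sw e).1 h; omega)]
    exact step "kontakt@" (fun e h => (rank_le_of_sw e).2.1 h) (fun e h => (sw_of_rank e).2.1 h) _
  · rw [show EMAIL_PRIORITY = "info@" :: ["kontakt@", "bokning@", "hej@", "mail@"] from rfl,
      pickLoopA, none_of_lt "info@" (fun e h => by have := (rank_le_of_sw e).1 h; omega),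
      pickLoopA, none_of_lt "kontakt@" (fun e h => by have := (rank_le_of_sw e).2.1 h; omega)]
    exact step "bokning@" (fun e h => (rank_le_of_sw e).2.2.1 h) (fun e h => (sw_of_rank e).2.2.1 h) _
  · rw [show EMAIL_PRIORITY = "info@" :: ["kontakt@", "bokning@", "hej@", "mail@"] from rfl,
      pickLoopA, none_of_lt "info@" (fun e h => by have := (rank_le_of_sw e).1 h; omega),
      pickLoopA, none_of_lt "kontakt@" (fun e h => by have := (rank_le_of_sw e).2.1 h; omega),
      pickLoopA, none_of_lt "bokning@" (fun e h => by have := (rank_le_of_sw e).2.2.1 h; omega)]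
    exact step "hej@" (fun e h => (rank_le_of_sw e).2.2.2.1 h) (fun e h => (sw_of_rank e).2.2.2.1 h) _
  · rw [show EMAIL_PRIORITY = "info@" :: ["kontakt@", "bokning@", "hej@", "mail@"] from rfl,
      pickLoopA, none_of_lt "info@" (fun e h => by have := (rank_le_of_sw e).1 h; omega),
      pickLoopA, none_of_lt "kontakt@" (fun e h => by have := (rank_le_of_sw e).2.1 h; omega),
      pickLoopA, none_of_lt "bokning@" (fun e h => by have := (rank_le_of_sw e).2.2.1 h; omega),
      pickLoopA, none_of_lt "hej@" (fun e h => by have := (rank_le_of_sw e).2.2.2.1 h; omega)]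
    exact step "mail@" (fun e h => (rank_le_of_sw e).2.2.2.2 h) (fun e h => (sw_of_rank e).2.2.2.2 h) _

-- ===== VERDICT (by name: the statement is the Claim_ definition above) =====
theorem pick_best_email_py_spec : Claim_equal_pick_best_email_py := by
  intro emails _
  unfold Spec_pick_best_email_py pick_best_email_py pick_best_email_py_alt
  by_cases hnil : emails = []
  · simp [hnil]
  · simp only [hnil, if_false]
    have hfold := fold_char emails none (EMAIL_PRIORITY.length : Int)
    have hlen : ((EMAIL_PRIORITY : List String).length : Int) = 5 := rfl
    rw [hlen] at hfold ⊢
    by_cases hm : minR 5 emails = 5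
    · -- no email matches any prefix: both fall through to emails[0]
      rw [hfold, if_pos hm]
      have hnone : pickLoopA emails EMAIL_PRIORITY = none := by
        have hall : ∀ p ∈ EMAIL_PRIORITY, emails.find? (fun e => PySem.Str.startswith e p) = none := by
          intro p hp
          apply List.find?_eq_none.2
          intro e he hsw
          have h5 : (5 : Int) ≤ rankOf e := by rw [← hm]; exact minR_le_mem emails 5 e he
          have : rankOf e ≤ 4 := by
            fin_cases hp
            · have := (rank_le_of_sw e).1 hsw; omega
            · have := (rank_le_of_sw e).2.1 hsw; omega
            · have := (rank_le_of_sw e).2.2.1 hsw; omega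
            · have := (rank_le_of_sw e).2.2.2.1 hsw; omega
            · exact (rank_le_of_sw e).2.2.2.2 hsw
          omega
        rw [show EMAIL_PRIORITY = "info@" :: ["kontakt@", "bokning@", "hej@", "mail@"] from rfl] at hall ⊢
        simp only [pickLoopA]
        rw [hall "info@" (by simp), hall "kontakt@" (by simp), hall "bokning@" (by simp),
          hall "hej@" (by simp), hall "mail@" (by simp)]
      rw [hnone]
    · -- some email matches: both return the earliest email of minimal rank
      set m := minR 5 emails with hmdef
      have hle : m ≤ 5 := minR_le emails 5
      rcases minR_attained emails 5 with h | ⟨e0, he0, hr0⟩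
      · exact absurd h hm
      · rw [← hmdef] at hr0
        have h0 : 0 ≤ m := by rw [← hr0]; exact rankOf_nonneg e0
        have h5 : m < 5 := lt_of_le_of_ne hle hm
        have hA := pickLoopA_char emails m h0 h5 (minR_le_mem emails 5) ⟨e0, he0, hr0⟩
        rw [hfold, if_neg hm, hA]
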